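-- pv_equiv track=rewrite | github.com/Qiza-lyhm/QuickTodo | scripts/update.py | find_task_by_title
-- ===== SOURCE A (Python) =====
-- def find_task_by_title(tasks, title):
--     """Simple fuzzy match by title substring."""
--     norm = title.strip()
--     for t in tasks:
--         if t.get("title", "").strip() == norm:
--             return t
--     for t in tasks:
--         if norm and norm in t.get("title", ""):
--             return t
--     return None
-- ===== SOURCE B (Python) =====
-- def find_task_by_title(tasks, title):
--     """Simple fuzzy match by title substring."""
--     norm = title.strip()
--     first_substring = None
--     for t in tasks:
--         if t.get("title", "").strip() == norm:
--             return t
--         if first_substring is None and norm and norm in t.get("title", ""):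
--             first_substring = t
--     return first_substring
-- ===== Notes on version B (the rewrite author's own statement) =====
-- stated objective: simpler
-- what changed: Replaced A's two sequential scans (exact pass, then substring pass) by a single pass that returns an exact match immediately and remembers the first substring match in an accumulator returned at the end.
import Mathlib
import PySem

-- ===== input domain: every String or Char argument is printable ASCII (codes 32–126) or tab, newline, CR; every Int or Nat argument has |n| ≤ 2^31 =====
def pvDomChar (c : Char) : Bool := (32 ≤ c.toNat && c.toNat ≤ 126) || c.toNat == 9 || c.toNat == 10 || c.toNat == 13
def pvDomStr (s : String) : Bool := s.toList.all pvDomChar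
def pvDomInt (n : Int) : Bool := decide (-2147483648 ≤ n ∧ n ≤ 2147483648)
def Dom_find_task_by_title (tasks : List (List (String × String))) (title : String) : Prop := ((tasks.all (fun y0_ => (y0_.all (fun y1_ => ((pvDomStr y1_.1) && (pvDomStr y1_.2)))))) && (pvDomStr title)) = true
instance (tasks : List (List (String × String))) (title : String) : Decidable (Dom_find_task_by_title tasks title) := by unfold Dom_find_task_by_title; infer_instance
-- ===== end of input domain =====

-- B replaces A's two sequential scans by a single pass that returns an exact match
-- immediately and remembers the first substring hit in an accumulator (objective: simpler).


-- ===== PORT A =====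
-- t.get("title", "") : first-match lookup in the association list (Python dict.get)
def pvGetTitle (t : List (String × String)) : String :=
  (PySem.Dict.mk t).getD "title" ""

-- first loop of A: first task whose stripped title equals norm
def pvExactScan (norm : String) : List (List (String × String)) → Option (List (String × String))
  | [] => none
  | t :: rest =>
    if PySem.Str.strip (pvGetTitle t) = norm then some t else pvExactScan norm rest

-- second loop of A: first task with norm truthy and norm a substring of the raw title
def pvSubScan (norm : String) : List (List (String × String)) → Option (List (String × String))
  | [] => none
  | t :: rest =>
    if norm ≠ "" ∧ PySem.Str.isIn norm (pvGetTitle t) then some t else pvSubScan norm rest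

def find_task_by_title (tasks : List (List (String × String))) (title : String) : Option (List (String × String)) :=
  let norm := PySem.Str.strip title
  match pvExactScan norm tasks with
  | some t => some t
  | none => pvSubScan norm tasks

-- ===== PORT B =====
-- single pass: return on exact match, remember the first substring match in `firstSub`
def pvOnePass (norm : String) (firstSub : Option (List (String × String))) :
    List (List (String × String)) → Option (List (String × String))
  | [] => firstSub
  | t :: rest =>
    if PySem.Str.strip (pvGetTitle t) = norm then some t
    else
      pvOnePass norm
        (if firstSub = none ∧ norm ≠ "" ∧ PySem.Str.isIn norm (pvGetTitle t)
         then some t else firstSub) rest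

def find_task_by_title_alt (tasks : List (List (String × String))) (title : String) : Option (List (String × String)) :=
  pvOnePass (PySem.Str.strip title) none tasks

-- ===== PRECONDITION & SPEC =====
def Spec_find_task_by_title (tasks : List (List (String × String))) (title : String) (out : Option (List (String × String))) : Prop := out = find_task_by_title_alt tasks title
instance (tasks : List (List (String × String))) (title : String) (out : Option (List (String × String))) : Decidable (Spec_find_task_by_title tasks title out) := by unfold Spec_find_task_by_title; infer_instance

-- ===== CLAIM (what is proved, stated in full; the proofs are below) =====
def Claim_equal_find_task_by_title : Prop := ∀ (tasks : List (List (String × String))) (title : String), Dom_find_task_by_title tasks title → Spec_find_task_by_title tasks title (find_task_by_title tasks title)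

-- ===== LEMMAS AND PROOFS =====

-- loop invariant: the one-pass loop yields the first exact match if any, else the
-- remembered candidate, else the first substring match of the remaining tasks
theorem pvOnePass_eq (norm : String) (tasks : List (List (String × String)))
    (firstSub : Option (List (String × String))) :
    pvOnePass norm firstSub tasks =
      match pvExactScan norm tasks with
      | some t => some t
      | none => match firstSub with
        | some c => some c
        | none => pvSubScan norm tasks := by
  induction tasks generalizing firstSub with
  | nil => cases firstSub <;> simp [pvOnePass, pvExactScan, pvSubScan]
  | cons t rest ih =>
    by_cases hex : PySem.Str.strip (pvGetTitle t) = norm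
    · simp [pvOnePass, pvExactScan, hex]
    · by_cases hs : norm ≠ "" ∧ PySem.Str.isIn norm (pvGetTitle t) <;>
        cases firstSub <;>
          simp only [pvOnePass, pvExactScan, pvSubScan, hex, hs, if_false, if_pos, if_neg,
            if_true, ih, and_true, and_false, true_and, false_and, reduceCtorEq,
            not_false_eq_true, ite_true, ite_false, eq_self_iff_true] <;>
            (try split) <;> simp_all

-- ===== VERDICT (by name: the statement is the Claim_ definition above) =====
theorem find_task_by_title_spec : Claim_equal_find_task_by_title := by
  intro tasks title _
  unfold Spec_find_task_by_title find_task_by_title find_task_by_title_alt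
  rw [pvOnePass_eq]
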